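-- pv_equiv track=rewrite | github.com/N21A/advent-of-code | _Season24/01 - Historian Hysteria/Python/aoc2024_01_2.py | calc_similarity_sum
-- ===== SOURCE A (Python) =====
-- def calc_similarity_sum(list1, list2):
--     """Calculates the sum of the similarity scores between items in the two lists."""
--     count = 0
--     similarity_sum = 0
--     similarity_scores = []
--
--     for i in range(0, len(list1)):
--         for j in range(0, len(list2)):
--             if list1[i] == list2[j]:
--                 count += 1
--         similarity_scores.append(int(list1[i]) * count)
--         count = 0
--
--     for i in range(0, len(similarity_scores)):
--         similarity_sum += similarity_scores[i]
--
--     return similarity_sum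
-- ===== SOURCE B (Python) =====
-- def calc_similarity_sum(list1, list2):
--     """Calculates the sum of the similarity scores between items in the two lists."""
--     a = sorted(list1)
--     b = sorted(list2)
--     total = 0
--     i = 0
--     j = 0
--     while i < len(a) and j < len(b):
--         if a[i] < b[j]:
--             i += 1
--         elif b[j] < a[i]:
--             j += 1
--         else:
--             v = a[i]
--             ci = 0
--             while i < len(a) and a[i] == v:
--                 ci += 1
--                 i += 1
--             cj = 0
--             while j < len(b) and b[j] == v:
--                 cj += 1
--                 j += 1
--             total += int(v) * ci * cj
--     return total
-- ===== Notes on version B (the rewrite author's own statement) =====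
-- stated objective: faster
-- what changed: Replaces the quadratic nested scan with sorting copies of both lists and a two-pointer merge that matches equal-value runs, adding v*run1*run2 per shared value.
import Mathlib
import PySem

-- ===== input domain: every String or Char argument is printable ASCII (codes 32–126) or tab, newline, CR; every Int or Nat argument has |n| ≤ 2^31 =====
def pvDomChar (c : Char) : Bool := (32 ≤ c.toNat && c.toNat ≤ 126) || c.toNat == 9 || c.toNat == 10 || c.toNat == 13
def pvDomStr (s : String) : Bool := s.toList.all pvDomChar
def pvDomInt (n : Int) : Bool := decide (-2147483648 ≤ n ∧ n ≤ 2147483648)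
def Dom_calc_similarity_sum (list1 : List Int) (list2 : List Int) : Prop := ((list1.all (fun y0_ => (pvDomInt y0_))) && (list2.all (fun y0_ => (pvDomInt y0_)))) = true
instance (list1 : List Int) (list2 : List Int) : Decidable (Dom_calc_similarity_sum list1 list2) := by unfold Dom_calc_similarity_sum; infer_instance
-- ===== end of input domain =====

-- B sorts copies of both lists and does a two-pointer run-merge instead of A's nested quadratic scan (faster).


-- ===== PORT A =====
def calc_similarity_sum (list1 : List Int) (list2 : List Int) : Int :=
  let similarity_scores : List Int :=
    (PySem.List.pyRange 0 (list1.length : Int) 1).foldl (fun scores i =>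
      let count : Int :=
        (PySem.List.pyRange 0 (list2.length : Int) 1).foldl (fun c j =>
          if PySem.List.pyGetD list1 i 0 == PySem.List.pyGetD list2 j 0 then c + 1 else c) 0
      scores ++ [PySem.List.pyGetD list1 i 0 * count]) []
  (PySem.List.pyRange 0 (similarity_scores.length : Int) 1).foldl
    (fun s i => s + PySem.List.pyGetD similarity_scores i 0) 0

-- ===== PORT B =====
-- inner 'while a[i] == v' run scan: returns (run length, rest of the list)
def pvSpan (v : Int) : List Int → Nat × List Int
  | [] => (0, [])
  | x :: xs => if x = v then ((pvSpan v xs).1 + 1, (pvSpan v xs).2) else (0, x :: xs)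

theorem pvSpan_len (v : Int) (l : List Int) : (pvSpan v l).2.length ≤ l.length := by
  induction l with
  | nil => simp [pvSpan]
  | cons x xs ih => by_cases h : x = v <;> (simp [pvSpan, h]; try omega)

-- the outer 'while i < len(a) and j < len(b)' two-pointer loop, with the running total
def pvMerge : List Int → List Int → Int → Int
  | [], _, total => total
  | _ :: _, [], total => total
  | x :: xs, y :: ys, total =>
    if x < y then pvMerge xs (y :: ys) total
    else if y < x then pvMerge (x :: xs) ys total
    else
      pvMerge (pvSpan x xs).2 (pvSpan x (y :: ys)).2
        (total + x * ((pvSpan x xs).1 + 1) * (pvSpan x (y :: ys)).1)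
termination_by a b _ => a.length + b.length
decreasing_by
  all_goals
    (try (have h1 := pvSpan_len x xs; have h2 := pvSpan_len x (y :: ys)));
    simp_all; try omega

def calc_similarity_sum_alt (list1 : List Int) (list2 : List Int) : Int :=
  let a := PySem.List.sorted list1 (fun v => v) false
  let b := PySem.List.sorted list2 (fun v => v) false
  pvMerge a b 0

-- ===== PRECONDITION & SPEC =====
def Spec_calc_similarity_sum (list1 : List Int) (list2 : List Int) (out : Int) : Prop := out = calc_similarity_sum_alt list1 list2
instance (list1 : List Int) (list2 : List Int) (out : Int) : Decidable (Spec_calc_similarity_sum list1 list2 out) := by unfold Spec_calc_similarity_sum; infer_instance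

-- ===== CLAIM (what is proved, stated in full; the proofs are below) =====
def Claim_equal_calc_similarity_sum : Prop := ∀ (list1 : List Int) (list2 : List Int), Dom_calc_similarity_sum list1 list2 → Spec_calc_similarity_sum list1 list2 (calc_similarity_sum list1 list2)

-- ===== LEMMAS AND PROOFS =====

-- A's inner scan over list2 computes the number of occurrences of v in list2.
theorem inner_count_eq (list2 : List Int) (v : Int) :
    (PySem.List.pyRange 0 (list2.length : Int) 1).foldl
      (fun c j => if v == PySem.List.pyGetD list2 j 0 then c + 1 else c) 0
      = (list2.count v : Int) := by
  rw [PySem.List.foldl_pyRange_zero_pyGetD' list2 0 (fun c x => if v == x then c + 1 else c) 0]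
  rw [PySem.List.foldl_count_if (fun x => v == x) list2 0]
  rw [List.count,
      List.countP_congr (p := fun x => v == x) (q := fun x => x == v)
        (fun x _ => by show (v == x) = true ↔ (x == v) = true; rw [Bool.beq_comm])]
  simp only [Int.zero_add]

-- A equals the reference map-sum
theorem a_eq_sum (l1 l2 : List Int) :
    calc_similarity_sum l1 l2 = (l1.map (fun v => v * (l2.count v : Int))).sum := by
  unfold calc_similarity_sum
  simp only [inner_count_eq]
  rw [PySem.List.foldl_pyRange_zero_pyGetD' l1 0
        (fun scores v => scores ++ [v * (l2.count v : Int)]) ([] : List Int)]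
  rw [PySem.List.foldl_append_singleton_eq_map (fun v => v * (l2.count v : Int)) l1 []]
  rw [List.nil_append]
  rw [PySem.List.foldl_pyRange_zero_pyGetD'
        (l1.map (fun v => v * (l2.count v : Int))) 0 (fun s x => s + x) 0]
  rw [show (fun (s x : Int) => s + x) = (· + ·) from rfl, ← List.sum_eq_foldl]

-- pvSpan decomposes a list into a replicate-run and the rest
theorem pvSpan_decomp (v : Int) (l : List Int) :
    l = List.replicate (pvSpan v l).1 v ++ (pvSpan v l).2 := by
  induction l with
  | nil => simp [pvSpan]
  | cons x xs ih =>
    by_cases h : x = v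
    · subst h; simp [pvSpan, List.replicate_succ]; exact ih
    · simp [pvSpan, h]

theorem pvSpan_rest_ne (v : Int) (l : List Int) :
    ∀ h t, (pvSpan v l).2 = h :: t → h ≠ v := by
  induction l with
  | nil => intro h t hht; simp [pvSpan] at hht
  | cons x xs ih =>
    intro h t hht
    by_cases hx : x = v
    · simp [pvSpan, hx] at hht; exact ih h t hht
    · simp [pvSpan, hx] at hht; exact hht.1 ▸ hx

-- the rest after a span is still sorted
theorem pairwise_span (v : Int) (l : List Int) (hs : l.Pairwise (· ≤ ·)) :
    (pvSpan v l).2.Pairwise (· ≤ ·) := by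
  have hs' : (List.replicate (pvSpan v l).1 v ++ (pvSpan v l).2).Pairwise (· ≤ ·) :=
    (pvSpan_decomp v l) ▸ hs
  exact (List.pairwise_append.mp hs').2.1

-- every element surviving a span of the minimum is strictly larger
theorem span_rest_gt (v : Int) (l : List Int) (hs : l.Pairwise (· ≤ ·))
    (hge : ∀ z ∈ l, v ≤ z) : ∀ z ∈ (pvSpan v l).2, v < z := by
  intro z hz
  cases hrest : (pvSpan v l).2 with
  | nil => rw [hrest] at hz; simp at hz
  | cons h tl =>
    have hne := pvSpan_rest_ne v l h tl hrest
    have hx2 : h ∈ (pvSpan v l).2 := by rw [hrest]; simp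
    have hmem : h ∈ l := (pvSpan_decomp v l).symm ▸ List.mem_append_right _ hx2
    have hvh : v < h := lt_of_le_of_ne (hge h hmem) (Ne.symm hne)
    rw [hrest] at hz
    rcases List.mem_cons.mp hz with rfl | hz'
    · exact hvh
    · have hp := pairwise_span v l hs
      rw [hrest] at hp
      exact lt_of_lt_of_le hvh ((List.pairwise_cons.mp hp).1 z hz')

theorem count_zero_of_gt (l : List Int) (v : Int) (h : ∀ z ∈ l, v < z) :
    l.count v = 0 :=
  List.count_eq_zero.mpr (fun hm => lt_irrefl v (h v hm))

-- the main merge lemma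
theorem merge_eq (a b : List Int) (t : Int)
    (ha : a.Pairwise (· ≤ ·)) (hb : b.Pairwise (· ≤ ·)) :
    pvMerge a b t = t + (a.map (fun v => v * (b.count v : Int))).sum := by
  induction a, b, t using pvMerge.induct with
  | case1 b t => simp [pvMerge]
  | case2 x xs t => simp [pvMerge]
  | case3 x xs y ys t hxy ih =>
    have hyz : ∀ z ∈ ys, y ≤ z := (List.pairwise_cons.mp hb).1
    have hc0 : (y :: ys).count x = 0 := by
      apply count_zero_of_gt
      intro z hz
      rcases List.mem_cons.mp hz with rfl | hz'
      · exact hxy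
      · exact lt_of_lt_of_le hxy (hyz z hz')
    rw [pvMerge, if_pos hxy, ih (List.pairwise_cons.mp ha).2 hb]
    simp [hc0]
  | case4 x xs y ys t hxy hyx ih =>
    have hxz : ∀ z ∈ xs, x ≤ z := (List.pairwise_cons.mp ha).1
    have hcongr : ∀ v ∈ x :: xs, v * ((y :: ys).count v : Int) = v * (ys.count v : Int) := by
      intro v hv
      have hvy : y < v := by
        rcases List.mem_cons.mp hv with rfl | hv'
        · exact hyx
        · exact lt_of_lt_of_le hyx (hxz v hv')
      rw [List.count_cons, if_neg (by simpa using ne_of_lt hvy), Nat.add_zero]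
    rw [pvMerge, if_neg hxy, if_pos hyx, ih ha (List.pairwise_cons.mp hb).2]
    rw [List.map_congr_left hcongr]
  | case5 x xs y ys t hxy hyx ih =>
    have hxey : x = y := le_antisymm (not_lt.mp hyx) (not_lt.mp hxy)
    subst hxey
    have hxz : ∀ z ∈ xs, x ≤ z := (List.pairwise_cons.mp ha).1
    have hbz : ∀ z ∈ x :: ys, x ≤ z := by
      intro z hz
      rcases List.mem_cons.mp hz with rfl | hz'
      · exact le_refl z
      · exact (List.pairwise_cons.mp hb).1 z hz'
    have ha2 : (pvSpan x xs).2.Pairwise (· ≤ ·) :=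
      pairwise_span x xs (List.pairwise_cons.mp ha).2
    have hb2 : (pvSpan x (x :: ys)).2.Pairwise (· ≤ ·) := pairwise_span x (x :: ys) hb
    have hagt : ∀ z ∈ (pvSpan x xs).2, x < z :=
      span_rest_gt x xs (List.pairwise_cons.mp ha).2 hxz
    have hbgt : ∀ z ∈ (pvSpan x (x :: ys)).2, x < z := span_rest_gt x (x :: ys) hb hbz
    rw [pvMerge, if_neg hxy, if_neg hyx, ih ha2 hb2]
    set ca := pvSpan x xs with hca
    set cb := pvSpan x (x :: ys) with hcbdef
    have hbdec : x :: ys = List.replicate cb.1 x ++ cb.2 := by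
      rw [hcbdef]; exact pvSpan_decomp x (x :: ys)
    have hadec : x :: xs = List.replicate (ca.1 + 1) x ++ ca.2 := by
      rw [List.replicate_succ, List.cons_append]
      exact congrArg (List.cons x) (by rw [hca]; exact pvSpan_decomp x xs)
    have hcb : (((x :: ys).count x : Nat) : Int) = (cb.1 : Int) := by
      conv_lhs => rw [hbdec]
      rw [List.count_append, List.count_replicate, if_pos (by simp),
          count_zero_of_gt _ _ hbgt]
      simp
    have hcrest : ∀ v ∈ ca.2,
        v * ((cb.2).count v : Int) = v * (((x :: ys)).count v : Int) := by
      intro v hv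
      conv_rhs => rw [hbdec]
      rw [List.count_append, List.count_replicate,
          if_neg (by simpa using ne_of_lt (hagt v hv))]
      simp
    conv_rhs => rw [hadec]
    rw [List.map_append, List.sum_append, List.map_replicate, List.sum_replicate,
        List.map_congr_left hcrest, hcb]
    push_cast [nsmul_eq_mul]
    ring

-- ===== VERDICT (by name: the statement is the Claim_ definition above) =====
theorem calc_similarity_sum_spec : Claim_equal_calc_similarity_sum := by
  intro list1 list2 _
  unfold Spec_calc_similarity_sum calc_similarity_sum_alt
  rw [a_eq_sum]
  rw [merge_eq _ _ 0 (PySem.List.sorted_pairwise list1 (fun v => v))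
        (PySem.List.sorted_pairwise list2 (fun v => v))]
  have hp1 := PySem.List.sorted_perm list1 (fun v => v) false
  have hp2 := PySem.List.sorted_perm list2 (fun v => v) false
  rw [Int.zero_add]
  have hf : (fun v : Int => v * (((PySem.List.sorted list2 (fun v => v) false).count v : Nat) : Int))
      = fun v : Int => v * ((list2.count v : Nat) : Int) := by
    funext v; rw [hp2.count_eq]
  rw [hf]
  exact ((hp1.map _).sum_eq).symm
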